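-- pv_equiv track=rewrite | github.com/aseu-dev/Taller-Evaluativo-Ficheros | thing.py | rest_tempo
-- ===== SOURCE A (Python) =====
-- def rest_tempo(hora_inicial: str, hora_final: str) -> int:
--     """ Funcion que solicita dos entradas de tipo texto, con formato hora y devuelve la diferencia entre ellas, por ejemplo:
--         "02\t:\t30" - "01\t:\t30"  ->  "60" """
--
--     hora01, minuto01 = extraccion(hora_inicial)
--     hora02, minuto02 = extraccion(hora_final)
--     minutos_hora_inicial = minuto01
--     minutos_hora_final = minuto02
--     for _ in range(hora01):
--         minutos_hora_inicial += 60
--     for _ in range(hora02):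
--         minutos_hora_final += 60
--     diferencia = max(minutos_hora_final,minutos_hora_inicial) - min(minutos_hora_inicial, minutos_hora_final)
--     return diferencia
--
-- def only_numbers(entrada: list) -> int:
--     ''' Recibe una lista con cuatro numeros y devuelve dos numeros compuestos por pares de la lista:
--         [1, 2, 3, 4] -> 12, 34 '''
--
--     aux = []
--     for i in entrada:
--         try:
--             int(i)
--         except ValueError:
--             pass
--         else:
--             aux += [int(i)]
--     combinacion1, combinacion2 = int(f'{aux[0]}{aux[1]}'), int(f'{aux[2]}{aux[3]}')
--     return combinacion1, combinacion2
--
-- def extraer_numeros(string: str) -> list[int]: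
--     ''' Recibe un string, y retorna una lista con todos los caracteres  compatibles con el formato integer, por ejemplo:
--         "s1j2,3k4:5" -> [1, 2, 3, 4, 5]'''
--
--     lista = []
--     for i in string:
--         lista += i
--     return only_numbers(lista)
--
-- def extraccion(tempo: str) -> int:
--     """ Toma una cadena de texto de formato hora y devuelve dos variables equivalentes a los numeros de la cadena:
--         "01\t:\t12" -> num1 = 1, num2 = 12"""
--
--     num1, num2 = extraer_numeros(tempo)
--     return num1, num2
-- ===== SOURCE B (Python) =====
-- def rest_tempo(hora_inicial: str, hora_final: str) -> int:
--     """Absolute difference in minutes between two time strings: parse the first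
--     four digit characters of each string as HHMM and return abs(final - inicial)."""
--     def minutes(s: str) -> int:
--         d = [int(c) for c in s if c.isdigit()][:4]
--         return (d[0] * 10 + d[1]) * 60 + d[2] * 10 + d[3]
--     return abs(minutes(hora_final) - minutes(hora_inicial))
-- ===== Notes on version B (the rewrite author's own statement) =====
-- stated objective: simpler
-- what changed: B computes each time's total minutes in closed form ((d0*10+d1)*60 + d2*10+d3 from the first four digit characters, selected with str.isdigit) and returns abs(final-inicial), replacing A's four-helper pipeline with its per-character try/except int() probe, its two loops that add 60 'hora' times, and its max-min difference.
import Mathlib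
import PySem

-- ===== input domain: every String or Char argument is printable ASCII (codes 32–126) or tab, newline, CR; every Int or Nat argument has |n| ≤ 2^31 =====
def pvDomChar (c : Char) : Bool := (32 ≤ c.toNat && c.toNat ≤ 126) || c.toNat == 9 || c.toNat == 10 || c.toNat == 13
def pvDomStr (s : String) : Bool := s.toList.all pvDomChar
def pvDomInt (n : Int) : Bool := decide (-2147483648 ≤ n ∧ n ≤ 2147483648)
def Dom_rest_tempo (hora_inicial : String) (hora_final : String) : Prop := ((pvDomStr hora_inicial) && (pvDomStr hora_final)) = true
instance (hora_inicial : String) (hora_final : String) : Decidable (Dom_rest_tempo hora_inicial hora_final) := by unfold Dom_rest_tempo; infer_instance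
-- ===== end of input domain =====

-- B replaces A's loop that adds 60 'hora' times and its max-min difference by the closed form
-- hour*60+minute and abs(final-inicial), with the same first-four-digit-characters parse: simpler.

-- ===== PORT A =====
-- Python iterates a str as 1-character strings; a 1-character string is represented here by its
-- Char, and int(i) on it is PySem.Int.ofChars? [i] (exact).
-- only_numbers: the try int(i)/aux += [int(i)] loop, then the two int(f'{aux[j]}{aux[k]}') pairs.
def pyOnlyNumbers (entrada : List Char) : Option (Int × Int) :=
  let aux := entrada.foldl (fun acc i =>
    match PySem.Int.ofChars? [i] with
    | some v => acc ++ [v]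
    | none => acc) ([] : List Int)
  match PySem.List.pyGet? aux 0, PySem.List.pyGet? aux 1,
        PySem.List.pyGet? aux 2, PySem.List.pyGet? aux 3 with
  | some a0, some a1, some a2, some a3 =>
      -- int(f'{aux[0]}{aux[1]}') = int(str(aux[0]) + str(aux[1])); each aux entry is a single
      -- digit, so this parse always succeeds and the .getD 0 default is never taken
      some ((PySem.Int.ofChars? (PySem.Int.toChars a0 ++ PySem.Int.toChars a1)).getD 0,
            (PySem.Int.ofChars? (PySem.Int.toChars a2 ++ PySem.Int.toChars a3)).getD 0)
  | _, _, _, _ => none  -- IndexError (fewer than four digit characters); excluded by Pre_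

-- extraer_numeros ('lista += i' over the string, then only_numbers); extraccion forwards the pair.
def pyExtraccion (tempo : String) : Option (Int × Int) :=
  pyOnlyNumbers (tempo.toList.foldl (fun lista i => lista ++ [i]) [])

def rest_tempo (hora_inicial : String) (hora_final : String) : Int :=
  match pyExtraccion hora_inicial, pyExtraccion hora_final with
  | some (hora01, minuto01), some (hora02, minuto02) =>
      let minutos_hora_inicial :=
        (PySem.List.pyRange 0 hora01 1).foldl (fun m _ => m + 60) minuto01
      let minutos_hora_final :=
        (PySem.List.pyRange 0 hora02 1).foldl (fun m _ => m + 60) minuto02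
      max minutos_hora_final minutos_hora_inicial - min minutos_hora_inicial minutos_hora_final
  | _, _ => 0  -- IndexError inside extraccion; excluded by Pre_

-- ===== PORT B =====
-- minutes(s): d = [int(c) for c in s if c.isdigit()][:4]; (d[0]*10+d[1])*60 + d[2]*10 + d[3]
def altMinutes? (s : String) : Option Int :=
  let d := ((s.toList.filter (fun c => PySem.Chars.isdigit c)).map
              (fun c => (PySem.Int.ofChars? [c]).getD 0)).take 4
  match PySem.List.pyGet? d 0, PySem.List.pyGet? d 1,
        PySem.List.pyGet? d 2, PySem.List.pyGet? d 3 with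
  | some a, some b, some c, some e => some ((a * 10 + b) * 60 + c * 10 + e)
  | _, _, _, _ => none  -- IndexError; excluded by Pre_

def rest_tempo_alt (hora_inicial : String) (hora_final : String) : Int :=
  match altMinutes? hora_final, altMinutes? hora_inicial with
  | some tf, some ti => |tf - ti|
  | _, _ => 0

-- ===== PRECONDITION & SPEC =====
-- Exactly the inputs where the Python A returns: on ASCII input int(c) on a single character
-- succeeds precisely for '0'..'9', and A hits aux[3] (IndexError) unless each string carries at
-- least four digit characters.
def Pre_rest_tempo (hora_inicial : String) (hora_final : String) : Prop :=
  4 ≤ hora_inicial.toList.countP (fun c => PySem.Chars.isdigit c) ∧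
  4 ≤ hora_final.toList.countP (fun c => PySem.Chars.isdigit c)
instance (hora_inicial : String) (hora_final : String) : Decidable (Pre_rest_tempo hora_inicial hora_final) := by unfold Pre_rest_tempo; infer_instance

def pvWitness_rest_tempo : String × String := (String.ofList ['0','2',':','3','0'], String.ofList ['0','1',':','3','0'])

def Spec_rest_tempo (hora_inicial : String) (hora_final : String) (out : Int) : Prop := out = rest_tempo_alt hora_inicial hora_final
instance (hora_inicial : String) (hora_final : String) (out : Int) : Decidable (Spec_rest_tempo hora_inicial hora_final out) := by unfold Spec_rest_tempo; infer_instance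

-- ===== CLAIM (what is proved, stated in full; the proofs are below) =====
def Claim_equal_rest_tempo : Prop := ∀ (hora_inicial : String) (hora_final : String), Dom_rest_tempo hora_inicial hora_final → Pre_rest_tempo hora_inicial hora_final → Spec_rest_tempo hora_inicial hora_final (rest_tempo hora_inicial hora_final)

-- ===== LEMMAS AND PROOFS =====

-- int(c) on a domain character: some (value) exactly on '0'..'9', ValueError otherwise.
lemma pv_char_parse (c : Char) (h : pvDomChar c = true) :
    PySem.Int.ofChars? [c] =
      (if PySem.Chars.isdigit c then some ((c.toNat : Int) - 48) else none) := by
  have hv : c.toNat < 127 := by simp [pvDomChar] at h; omega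
  have hc : Char.ofNat c.toNat = c := Char.ofNat_toNat c
  rw [← hc]
  exact (by decide : ∀ n : Nat, n < 127 → PySem.Int.ofChars? [Char.ofNat n] =
    (if PySem.Chars.isdigit (Char.ofNat n) then some (((Char.ofNat n).toNat : Int) - 48)
     else none)) c.toNat hv

lemma pv_digit_bound (c : Char) (h : pvDomChar c = true) (hd : PySem.Chars.isdigit c = true) :
    48 ≤ c.toNat ∧ c.toNat ≤ 57 := by
  have hv : c.toNat < 127 := by simp [pvDomChar] at h; omega
  have hc : Char.ofNat c.toNat = c := Char.ofNat_toNat c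
  rw [← hc] at hd ⊢
  exact (by decide : ∀ n : Nat, n < 127 → PySem.Chars.isdigit (Char.ofNat n) = true →
    48 ≤ (Char.ofNat n).toNat ∧ (Char.ofNat n).toNat ≤ 57) c.toNat hv hd

-- A's aux loop builds exactly the digit values, in order.
lemma pv_aux_eq (cs : List Char) (h : ∀ c ∈ cs, pvDomChar c = true) (acc : List Int) :
    cs.foldl (fun acc i =>
      match PySem.Int.ofChars? [i] with
      | some v => acc ++ [v]
      | none => acc) acc
    = acc ++ (cs.filter (fun c => PySem.Chars.isdigit c)).map (fun c => (c.toNat : Int) - 48) := by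
  induction cs generalizing acc with
  | nil => simp
  | cons c cs ih =>
    have hc := pv_char_parse c (h c (by simp))
    have ih' := ih (fun x hx => h x (by simp [hx]))
    by_cases hd : PySem.Chars.isdigit c
    · rw [if_pos hd] at hc
      simp [List.foldl_cons, hc, hd, ih']
    · rw [if_neg hd] at hc
      simp [List.foldl_cons, hc, hd, ih']

lemma pv_two_digit (a b : Nat) (ha : a < 10) (hb : b < 10) :
    PySem.Int.ofChars? (PySem.Int.toChars (a : Int) ++ PySem.Int.toChars (b : Int))
      = some ((10 * a + b : Nat) : Int) := by
  interval_cases a <;> interval_cases b <;> decide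

lemma pv_loop (l : List Int) (m : Int) :
    l.foldl (fun m _ => m + 60) m = m + 60 * l.length := by
  induction l generalizing m with
  | nil => simp
  | cons x t ih => simp [List.foldl_cons, ih]; ring

lemma pv_get0 (d0 d1 d2 d3 : Int) (t : List Int) :
    PySem.List.pyGet? (d0 :: d1 :: d2 :: d3 :: t) 0 = some d0 := by
  simp [PySem.List.pyGet?, PySem.List.pyIdx?]
  rw [if_pos (by omega)]; simp
lemma pv_get1 (d0 d1 d2 d3 : Int) (t : List Int) :
    PySem.List.pyGet? (d0 :: d1 :: d2 :: d3 :: t) 1 = some d1 := by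
  simp [PySem.List.pyGet?, PySem.List.pyIdx?]
  rw [if_pos (by omega)]; simp
lemma pv_get2 (d0 d1 d2 d3 : Int) (t : List Int) :
    PySem.List.pyGet? (d0 :: d1 :: d2 :: d3 :: t) 2 = some d2 := by
  simp [PySem.List.pyGet?, PySem.List.pyIdx?]
  rw [if_pos (by omega)]; simp
lemma pv_get3 (d0 d1 d2 d3 : Int) (t : List Int) :
    PySem.List.pyGet? (d0 :: d1 :: d2 :: d3 :: t) 3 = some d3 := by
  simp [PySem.List.pyGet?, PySem.List.pyIdx?]
  rw [if_pos (by omega)]; simp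

-- Per string: under Dom and ≥ 4 digit characters, A's extraccion returns (10a+b, 10c+d) for the
-- first four digit values a b c d, and B's minutes returns (10a+b)*60 + 10c+d.
lemma pv_per_string (s : String) (hdom : pvDomStr s = true)
    (hpre : 4 ≤ s.toList.countP (fun c => PySem.Chars.isdigit c)) :
    ∃ a b c d : Nat, a < 10 ∧ b < 10 ∧ c < 10 ∧ d < 10 ∧
      pyExtraccion s = some (((10 * a + b : Nat) : Int), ((10 * c + d : Nat) : Int)) ∧
      altMinutes? s = some (((10 * a + b : Nat) : Int) * 60 + ((10 * c + d : Nat) : Int)) := by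
  have hall : ∀ c ∈ s.toList, pvDomChar c = true := by
    simpa [pvDomStr, List.all_eq_true] using hdom
  have hlen : 4 ≤ ((s.toList.filter (fun c => PySem.Chars.isdigit c)).map
      (fun c => (c.toNat : Int) - 48)).length := by
    simpa [List.countP_eq_length_filter] using hpre
  have hdigit : ∀ x ∈ (s.toList.filter (fun c => PySem.Chars.isdigit c)).map
      (fun c => (c.toNat : Int) - 48), ∃ n : Nat, n < 10 ∧ x = (n : Int) := by
    intro x hx
    obtain ⟨c, hc, rfl⟩ := List.mem_map.1 hx
    obtain ⟨hcm, hcd⟩ := List.mem_filter.1 hc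
    obtain ⟨h1, h2⟩ := pv_digit_bound c (hall c hcm) hcd
    exact ⟨c.toNat - 48, by omega, by omega⟩
  obtain ⟨x0, x1, x2, x3, t, hL⟩ : ∃ x0 x1 x2 x3 t,
      (s.toList.filter (fun c => PySem.Chars.isdigit c)).map (fun c => (c.toNat : Int) - 48)
        = x0 :: x1 :: x2 :: x3 :: t := by
    rcases hLl : (s.toList.filter (fun c => PySem.Chars.isdigit c)).map
        (fun c => (c.toNat : Int) - 48) with _ | ⟨x0, _ | ⟨x1, _ | ⟨x2, _ | ⟨x3, t⟩⟩⟩⟩ <;>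
      first
        | exact ⟨_, _, _, _, _, hLl⟩
        | (rw [hLl] at hlen; simp at hlen)
  rw [hL] at hdigit
  obtain ⟨a, ha, rfl⟩ := hdigit x0 (by simp)
  obtain ⟨b, hb, rfl⟩ := hdigit x1 (by simp)
  obtain ⟨c, hc, rfl⟩ := hdigit x2 (by simp)
  obtain ⟨d, hd, rfl⟩ := hdigit x3 (by simp)
  refine ⟨a, b, c, d, ha, hb, hc, hd, ?_, ?_⟩
  · rw [pyExtraccion, pyOnlyNumbers]
    rw [PySem.List.foldl_append_singleton, List.nil_append,
        pv_aux_eq s.toList hall [], List.nil_append, hL,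
        pv_get0, pv_get1, pv_get2, pv_get3]
    simp only [pv_two_digit a b ha hb, pv_two_digit c d hc hd, Option.getD_some]
  · rw [altMinutes?]
    have hmap : (s.toList.filter (fun c => PySem.Chars.isdigit c)).map
        (fun c => (PySem.Int.ofChars? [c]).getD 0)
        = (s.toList.filter (fun c => PySem.Chars.isdigit c)).map
            (fun c => (c.toNat : Int) - 48) := by
      refine List.map_congr_left ?_
      intro c hc'
      obtain ⟨hcm, hcd⟩ := List.mem_filter.1 hc'
      rw [pv_char_parse c (hall c hcm), if_pos hcd, Option.getD_some]
    rw [hmap, hL]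
    simp only [List.take_succ_cons, List.take_zero, pv_get0, pv_get1, pv_get2, pv_get3]
    congr 1
    push_cast
    ring

-- ===== VERDICT (by name: the statement is the Claim_ definition above) =====
theorem rest_tempo_spec : Claim_equal_rest_tempo := by
  intro hi hf hdom hpre
  obtain ⟨hd1, hd2⟩ : pvDomStr hi = true ∧ pvDomStr hf = true := by
    simpa [Dom_rest_tempo, Bool.and_eq_true] using hdom
  obtain ⟨hp1, hp2⟩ := hpre
  obtain ⟨a1, b1, c1, d1, ha1, hb1, hc1, hd1', hE1, hM1⟩ := pv_per_string hi hd1 hp1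
  obtain ⟨a2, b2, c2, d2, ha2, hb2, hc2, hd2', hE2, hM2⟩ := pv_per_string hf hd2 hp2
  unfold Spec_rest_tempo
  simp only [rest_tempo, rest_tempo_alt, hE1, hE2, hM1, hM2]
  rw [pv_loop, pv_loop, PySem.List.length_pyRange_one, PySem.List.length_pyRange_one]
  have e1 : ((((10 * a1 + b1 : Nat) : Int) - 0).toNat : Int) = ((10 * a1 + b1 : Nat) : Int) := by
    omega
  have e2 : ((((10 * a2 + b2 : Nat) : Int) - 0).toNat : Int) = ((10 * a2 + b2 : Nat) : Int) := by
    omega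
  rw [e1, e2]
  set ti : Int := ((10 * a1 + b1 : Nat) : Int) * 60 + ((10 * c1 + d1 : Nat) : Int) with hti
  set tf : Int := ((10 * a2 + b2 : Nat) : Int) * 60 + ((10 * c2 + d2 : Nat) : Int) with htf
  have hmi : ((10 * c1 + d1 : Nat) : Int) + 60 * ((10 * a1 + b1 : Nat) : Int) = ti := by
    rw [hti]; ring
  have hmf : ((10 * c2 + d2 : Nat) : Int) + 60 * ((10 * a2 + b2 : Nat) : Int) = tf := by
    rw [htf]; ring
  rw [hmi, hmf]
  rcases le_total ti tf with h | h
  · rw [abs_of_nonneg (by omega)]; omega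
  · rw [abs_of_nonpos (by omega)]; omega
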